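-- pv_equiv track=rewrite | github.com/AnthonyDMen/retro_royal | minigames/domino_duel/game.py | _tile_index_for
-- ===== SOURCE A (Python) =====
-- def _tile_index_for(a, b):
--     if a > b:
--         a, b = b, a
--     idx = 0
--     for i in range(7):
--         for j in range(i, 7):
--             if i == a and j == b:
--                 return idx
--             idx += 1
--     return None
-- ===== SOURCE B (Python) =====
-- def _tile_index_for(a, b):
--     lo, hi = (a, b) if a <= b else (b, a)
--     if 0 <= lo <= hi <= 6:
--         return lo * (15 - lo) // 2 + (hi - lo)
--     return None
-- ===== Notes on version B (the rewrite author's own statement) =====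
-- stated objective: simpler
-- what changed: Replaces the nested scan over all 28 ordered pairs with a closed-form triangular rank lo*(15-lo)//2 + (hi-lo) after a range check.
import Mathlib
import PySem

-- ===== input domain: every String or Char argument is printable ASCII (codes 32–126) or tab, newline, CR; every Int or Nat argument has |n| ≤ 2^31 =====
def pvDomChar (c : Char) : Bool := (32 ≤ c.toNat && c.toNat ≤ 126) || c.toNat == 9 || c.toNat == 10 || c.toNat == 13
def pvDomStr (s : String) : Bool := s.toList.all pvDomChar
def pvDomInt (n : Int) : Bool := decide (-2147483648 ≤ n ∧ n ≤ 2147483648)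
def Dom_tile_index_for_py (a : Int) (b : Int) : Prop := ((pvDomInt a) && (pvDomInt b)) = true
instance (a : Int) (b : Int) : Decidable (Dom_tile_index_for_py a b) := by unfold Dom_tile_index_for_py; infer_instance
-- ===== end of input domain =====

-- B replaces A's 28-step nested scan over the ordered pairs by a guarded closed-form
-- triangular rank (objective: simpler).


-- ===== PORT A =====
-- the nested 'for i in range(7): for j in range(i,7):' as the flattened list of pairs,
-- scanned left to right with the running idx and early return (exact transliteration)
def tilePairs : List (Int × Int) :=
  (PySem.List.pyRange 0 7 1).flatMap (fun i => (PySem.List.pyRange i 7 1).map (fun j => (i, j)))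

def tileScan (a b : Int) : List (Int × Int) → Int → Option Int
  | [], _ => none
  | (i, j) :: rest, idx => if i = a ∧ j = b then some idx else tileScan a b rest (idx + 1)

def tile_index_for_py (a : Int) (b : Int) : Option Int :=
  let ab := if a > b then (b, a) else (a, b)
  tileScan ab.1 ab.2 tilePairs 0

-- ===== PORT B =====
def tile_index_for_py_alt (a : Int) (b : Int) : Option Int :=
  let lo := if a ≤ b then a else b
  let hi := if a ≤ b then b else a
  if 0 ≤ lo ∧ lo ≤ hi ∧ hi ≤ 6 then
    some (PySem.Int.floordiv (lo * (15 - lo)) 2 + (hi - lo))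
  else none

-- ===== PRECONDITION & SPEC =====
def Spec_tile_index_for_py (a : Int) (b : Int) (out : Option Int) : Prop := out = tile_index_for_py_alt a b
instance (a : Int) (b : Int) (out : Option Int) : Decidable (Spec_tile_index_for_py a b out) := by unfold Spec_tile_index_for_py; infer_instance

-- ===== CLAIM (what is proved, stated in full; the proofs are below) =====
def Claim_equal_tile_index_for_py : Prop := ∀ (a : Int) (b : Int), Dom_tile_index_for_py a b → Spec_tile_index_for_py a b (tile_index_for_py a b)

-- ===== LEMMAS AND PROOFS =====

theorem tileScan_none (a b : Int) (l : List (Int × Int)) (idx : Int)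
    (h : ∀ p ∈ l, ¬(p.1 = a ∧ p.2 = b)) : tileScan a b l idx = none := by
  induction l generalizing idx with
  | nil => rfl
  | cons p rest ih =>
    obtain ⟨i, j⟩ := p
    simp only [tileScan]
    rw [if_neg (h (i, j) (List.mem_cons_self ..))]
    exact ih _ (fun q hq => h q (List.mem_cons_of_mem _ hq))

theorem tilePairs_bounds : ∀ p ∈ tilePairs, 0 ≤ p.1 ∧ p.1 ≤ p.2 ∧ p.2 ≤ 6 := by decide

theorem tileScan_closed (a b : Int) (hab : a ≤ b) :
    tileScan a b tilePairs 0 =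
      (if 0 ≤ a ∧ a ≤ b ∧ b ≤ 6 then
        some (PySem.Int.floordiv (a * (15 - a)) 2 + (b - a)) else none) := by
  by_cases h : 0 ≤ a ∧ a ≤ b ∧ b ≤ 6
  · rw [if_pos h]
    obtain ⟨h0, _, h6⟩ := h
    have hb0 : 0 ≤ b := le_trans h0 hab
    have ha6 : a ≤ 6 := le_trans hab h6
    interval_cases a <;> interval_cases b <;> decide
  · rw [if_neg h]
    apply tileScan_none
    intro p hp hpab
    have := tilePairs_bounds p hp
    omega

-- ===== VERDICT (by name: the statement is the Claim_ definition above) =====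
theorem tile_index_for_py_spec : Claim_equal_tile_index_for_py := by
  intro a b _
  unfold Spec_tile_index_for_py tile_index_for_py tile_index_for_py_alt
  by_cases h : a ≤ b
  · have hgt : ¬ a > b := not_lt.mpr h
    simp only [if_neg hgt, if_pos h]
    exact tileScan_closed a b h
  · have hgt : a > b := lt_of_not_ge h
    simp only [if_pos hgt, if_neg h]
    exact tileScan_closed b a (le_of_lt hgt)
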